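-- pv_equiv track=rewrite | github.com/Zeydel/Everybody-Codes | Echoes of Enigmatus/Quest2/Quest2_part2.py | get_level_populations
-- ===== SOURCE A (Python) =====
-- def get_level_populations(tree, node, level=0):
--
--     populations = dict()
--
--     if node not in tree:
--         return populations
--
--     if level not in populations:
--         populations[level] = 1
--
--     left_subtree_levels = get_level_populations(tree, tree[node][2], level+1)
--
--     for l_populations in left_subtree_levels:
--
--         if l_populations not in populations:
--             populations[l_populations] = 0
--
--         populations[l_populations] += left_subtree_levels[l_populations]
--
--     right_subtree_levels = get_level_populations(tree, tree[node][3], level+1)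
--
--     for r_populations in right_subtree_levels:
--
--         if r_populations not in populations:
--             populations[r_populations] = 0
--
--         populations[r_populations] += right_subtree_levels[r_populations]
--
--     return populations
-- ===== SOURCE B (Python) =====
-- def get_level_populations(tree, node, level=0):
--     # Iterative breadth-first level count: count each level frontier once; no recursion, no dict merging.
--     populations = dict()
--     current = [node]
--     while True:
--         current = [n for n in current if n in tree]
--         if not current:
--             return populations
--         populations[level] = len(current)
--         current = [c for n in current for c in (tree[n][2], tree[n][3])]
--         level += 1
-- ===== Notes on version B (the rewrite author's own statement) =====
-- stated objective: alternative
-- what changed: A recursively computes a level->count dict per subtree and merges child dicts into the parent at every node; B does a single iterative breadth-first sweep over level frontiers, counting each frontier once, with no recursion and no dict merging.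
-- outside the precondition, e.g. on get_level_populations({1: [0, 0, 0, 0], 2: [0]}, 1, 0): A returns {0: 1}, B returns {0: 1}
import Mathlib
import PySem

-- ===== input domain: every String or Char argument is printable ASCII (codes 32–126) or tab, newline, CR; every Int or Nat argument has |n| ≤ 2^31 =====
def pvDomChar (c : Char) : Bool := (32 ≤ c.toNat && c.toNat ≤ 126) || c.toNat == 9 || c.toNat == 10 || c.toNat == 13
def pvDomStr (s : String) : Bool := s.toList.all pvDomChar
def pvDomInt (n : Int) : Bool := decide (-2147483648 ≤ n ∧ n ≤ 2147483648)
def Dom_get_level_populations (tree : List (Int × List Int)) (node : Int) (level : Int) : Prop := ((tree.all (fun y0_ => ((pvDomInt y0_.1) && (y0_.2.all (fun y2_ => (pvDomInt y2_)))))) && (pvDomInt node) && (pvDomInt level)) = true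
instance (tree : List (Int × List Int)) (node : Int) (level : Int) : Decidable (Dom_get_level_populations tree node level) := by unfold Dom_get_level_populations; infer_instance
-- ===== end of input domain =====

-- B replaces A's per-node recursive dict-merging with a single iterative breadth-first
-- sweep that counts each level's frontier once (no recursion, no dict merging).

-- ===== PORT A =====
-- one step of A's merge loop: `if l not in populations: populations[l] = 0; populations[l] += src[l]`
def dstep (d : PySem.Dict Int Int) (kv : Int × Int) : PySem.Dict Int Int :=
  let d1 := if d.contains kv.1 then d else d.insert kv.1 0
  d1.insert kv.1 (d1.getD kv.1 0 + kv.2)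

-- A's `for l in src: …` merge loop over the dict returned by a recursive call
def dmerge (d e : PySem.Dict Int Int) : PySem.Dict Int Int :=
  e.items.foldl dstep d

-- A's recursion, fueled (Python recursion depth; fuel `tree.length + 1` is never
-- exhausted on inputs satisfying Pre_, where A's recursion depth is bounded by the
-- number of distinct keys because no cycle is reachable from `node`)
def goA (tree : PySem.Dict Int (List Int)) : Nat → Int → Int → PySem.Dict Int Int
  | 0, _, _ => PySem.Dict.empty
  | f + 1, node, level =>
    let populations : PySem.Dict Int Int := PySem.Dict.empty
    if ¬ tree.contains node then populations
    else
      let populations := if ¬ populations.contains level then populations.insert level 1 else populations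
      -- tree[node][2] / tree[node][3]; the `getD` defaults are never used under Pre_
      let v := tree.getD node []
      let populations := dmerge populations (goA tree f ((PySem.List.pyGet? v 2).getD 0) (level + 1))
      dmerge populations (goA tree f ((PySem.List.pyGet? v 3).getD 0) (level + 1))

def get_level_populations (tree : List (Int × List Int)) (node : Int) (level : Int) : List (Int × Int) :=
  (goA (PySem.Dict.mk tree) (tree.length + 1) node level).items

-- ===== PORT B =====
-- the pair (tree[n][2], tree[n][3]) of B's children comprehension
def childPair (tree : PySem.Dict Int (List Int)) (n : Int) : List Int :=
  let v := tree.getD n []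
  [(PySem.List.pyGet? v 2).getD 0, (PySem.List.pyGet? v 3).getD 0]

-- B's `while True` loop, fueled (one fuel per level; `tree.length + 1` is never
-- exhausted under Pre_)
def goB (tree : PySem.Dict Int (List Int)) :
    Nat → List Int → Int → PySem.Dict Int Int → PySem.Dict Int Int
  | 0, _, _, populations => populations
  | f + 1, current, level, populations =>
    let cur := current.filter (fun n => tree.contains n)
    if cur = [] then populations
    else
      goB tree f (cur.flatMap (childPair tree)) (level + 1)
        (populations.insert level (cur.length : Int))

def get_level_populations_alt (tree : List (Int × List Int)) (node : Int) (level : Int) : List (Int × Int) :=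
  (goB (PySem.Dict.mk tree) (tree.length + 1) [node] level PySem.Dict.empty).items

-- ===== PRECONDITION & SPEC =====
-- the two child pointers of key k (first matching entry), used only to STATE Pre_
def pvKids (tree : List (Int × List Int)) (k : Int) : List Int :=
  match tree.find? (fun p => p.1 == k) with
  | some p => [(PySem.List.pyGet? p.2 2).getD 0, (PySem.List.pyGet? p.2 3).getD 0]
  | none => []

-- the multiset of nodes at pointer-distance exactly n from the start set (non-keys
-- have no children); a graph-reachability property of the input, not a run of a port
def pvFrontier (tree : List (Int × List Int)) : Nat → List Int → List Int
  | 0, s => s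
  | n + 1, s => pvFrontier tree n (s.flatMap (pvKids tree))

-- When the start node is not a key, A returns {} at once, whatever the tree looks like
-- (first disjunct).  Otherwise Pre_ excludes exactly three kinds of input:
-- (a) association lists with duplicate keys — these cannot arise from a Python dict
--     argument, so A's behaviour there is nobody's;
-- (b) trees with a cycle reachable from `node` — A raises RecursionError there; the
--     last conjunct says no key lies at pointer-distance tree.length + 1 from `node`,
--     which for nodup keys holds iff no reachable cycle exists (a path that long must
--     repeat a key);
-- (c) entries whose value list is shorter than 4 — A raises IndexError when such an
--     entry is reached; requiring it of ALL entries also excludes some inputs with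
--     UNREACHABLE short entries on which A returns normally (a stated narrowing, see
--     the cite in claim.json).
def Pre_get_level_populations (tree : List (Int × List Int)) (node : Int) (level : Int) : Prop :=
  node ∉ (tree.map Prod.fst) ∨
  ((tree.map Prod.fst).Nodup ∧
    (∀ i, (h : i < tree.length) → 4 ≤ tree[i].2.length) ∧
    (pvFrontier tree (tree.length + 1) [node]).filter (fun k => k ∈ tree.map Prod.fst) = [])

instance (tree : List (Int × List Int)) (node : Int) (level : Int) : Decidable (Pre_get_level_populations tree node level) := by
  unfold Pre_get_level_populations; infer_instance

def pvWitness_get_level_populations : (List (Int × List Int)) × Int × Int :=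
  ([(2, [0, 0, 0, 0]), (1, [0, 0, 2, 3]), (3, [0, 0, 0, 0])], 1, 0)

def Spec_get_level_populations (tree : List (Int × List Int)) (node : Int) (level : Int) (out : List (Int × Int)) : Prop := out = get_level_populations_alt tree node level
instance (tree : List (Int × List Int)) (node : Int) (level : Int) (out : List (Int × Int)) : Decidable (Spec_get_level_populations tree node level out) := by unfold Spec_get_level_populations; infer_instance

-- ===== CLAIM (what is proved, stated in full; the proofs are below) =====
def Claim_equal_get_level_populations : Prop := ∀ (tree : List (Int × List Int)) (node : Int) (level : Int), Dom_get_level_populations tree node level → Pre_get_level_populations tree node level → Spec_get_level_populations tree node level (get_level_populations tree node level)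

-- ===== LEMMAS AND PROOFS =====

-- the levels dict `{l: c0, l+1: c1, …}` both programs build
def zipL : Int → List Int → List (Int × Int)
  | _, [] => []
  | l, c :: cs => (l, c) :: zipL (l + 1) cs

-- pointwise sum of two per-level count vectors, padding with the longer one
def addVec : List Int → List Int → List Int
  | [], ys => ys
  | x :: xs, [] => x :: xs
  | x :: xs, y :: ys => (x + y) :: addVec xs ys

-- per-level count of the nodes of `tree` reachable from the frontier, one fuel per level
def countVec (tree : PySem.Dict Int (List Int)) : Nat → List Int → List Int
  | 0, _ => []
  | f + 1, ns =>
    let cur := ns.filter (fun n => tree.contains n)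
    if cur = [] then [] else (cur.length : Int) :: countVec tree f (cur.flatMap (childPair tree))

theorem addVec_nil_right : ∀ xs : List Int, addVec xs [] = xs := by
  intro xs; cases xs <;> rfl

theorem zipL_keys_ge : ∀ (cs : List Int) (l : Int), ∀ p ∈ zipL l cs, l ≤ p.1 := by
  intro cs
  induction cs with
  | nil => intro l p hp; simp [zipL] at hp
  | cons c cs ih =>
    intro l p hp
    simp only [zipL, List.mem_cons] at hp
    rcases hp with h | h
    · simp [h]
    · have := ih (l + 1) p h; omega

theorem dstep_eq (d : PySem.Dict Int Int) (k v : Int) :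
    dstep d (k, v) = d.insert k (d.getD k 0 + v) := by
  by_cases h : d.contains k
  · simp [dstep, h]
  · have hget : d.getD k 0 = 0 := by
      simp only [PySem.Dict.getD, PySem.Dict.get?]
      have hfind : d.items.find? (fun p => p.1 == k) = none := by
        rw [List.find?_eq_none]
        intro p hp hh
        simp only [PySem.Dict.contains, List.any_eq_true] at h
        exact h ⟨p, hp, hh⟩
      simp [hfind]
    simp [dstep, h, hget, PySem.Dict.insert_insert_self]

-- merging a dict whose keys all exceed l passes over a head entry at key l
theorem dstep_cons_ne (l x k v : Int) (d : List (Int × Int)) (h : k ≠ l) :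
    dstep (PySem.Dict.mk ((l, x) :: d)) (k, v)
      = PySem.Dict.mk ((l, x) :: (dstep (PySem.Dict.mk d) (k, v)).items) := by
  rw [dstep_eq, dstep_eq]
  have hlk : (l == k) = false := by simp [Ne.symm h]
  have hco : (PySem.Dict.mk ((l, x) :: d)).contains k = (PySem.Dict.mk d).contains k := by
    simp [PySem.Dict.contains, hlk]
  have hgd : (PySem.Dict.mk ((l, x) :: d)).getD k 0 = (PySem.Dict.mk d).getD k 0 := by
    simp [PySem.Dict.getD, PySem.Dict.get?, List.find?, hlk]
  by_cases hc : (PySem.Dict.mk d).contains k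
  · simp [PySem.Dict.insert, hco, hc, hgd]
    exact fun hlk' => absurd hlk'.symm h
  · simp [PySem.Dict.insert, hco, hc, hgd]

theorem foldl_dstep_cons (l x : Int) (es : List (Int × Int)) :
    ∀ (d : List (Int × Int)), (∀ p ∈ es, l < p.1) →
      es.foldl dstep (PySem.Dict.mk ((l, x) :: d))
        = PySem.Dict.mk ((l, x) :: (es.foldl dstep (PySem.Dict.mk d)).items) := by
  induction es with
  | nil => intro d _; rfl
  | cons e es ih =>
    intro d hkeys
    have hne : e.1 ≠ l := by have := hkeys e (by simp); omega
    simp only [List.foldl_cons]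
    have : dstep (PySem.Dict.mk ((l, x) :: d)) e
        = PySem.Dict.mk ((l, x) :: (dstep (PySem.Dict.mk d) e).items) := by
      obtain ⟨k, v⟩ := e; exact dstep_cons_ne l x k v d hne
    rw [this]
    have := ih (dstep (PySem.Dict.mk d) e).items (fun p hp => hkeys p (by simp [hp]))
    simpa using this

theorem foldl_dstep_zipL : ∀ (ys : List Int) (l : Int) (xs : List Int),
    (zipL l ys).foldl dstep (PySem.Dict.mk (zipL l xs)) = PySem.Dict.mk (zipL l (addVec xs ys)) := by
  intro ys
  induction ys with
  | nil => intro l xs; simp [zipL, addVec_nil_right]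
  | cons y ys ih =>
    intro l xs
    simp only [zipL, List.foldl_cons]
    cases xs with
    | nil =>
      have hstep : dstep (PySem.Dict.mk (zipL l ([] : List Int))) (l, y)
          = PySem.Dict.mk [(l, y)] := by
        rw [dstep_eq]
        simp [zipL, PySem.Dict.insert, PySem.Dict.contains, PySem.Dict.getD, PySem.Dict.get?]
      rw [hstep]
      rw [foldl_dstep_cons l y (zipL (l + 1) ys) []
        (fun p hp => by have := zipL_keys_ge ys (l + 1) p hp; omega)]
      have := ih (l + 1) ([] : List Int)
      simp only [zipL] at this ⊢
      rw [this]
      simp [addVec, zipL]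
    | cons x xs =>
      have hstep : dstep (PySem.Dict.mk (zipL l (x :: xs))) (l, y)
          = PySem.Dict.mk ((l, x + y) :: zipL (l + 1) xs) := by
        rw [dstep_eq]
        have hco : (PySem.Dict.mk (zipL l (x :: xs))).contains l = true := by
          simp [zipL, PySem.Dict.contains]
        have hgd : (PySem.Dict.mk (zipL l (x :: xs))).getD l 0 = x := by
          simp [zipL, PySem.Dict.getD, PySem.Dict.get?]
        rw [hgd]
        simp only [PySem.Dict.insert, hco, if_pos]
        have : ∀ p ∈ zipL (l + 1) xs, (p.1 == l) = false := by
          intro p hp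
          have := zipL_keys_ge xs (l + 1) p hp
          simp only [beq_eq_false_iff_ne, ne_eq]; omega
        simp [zipL, List.map_eq_iff]
        intro i
        cases hi : (zipL (l + 1) xs)[i]? with
        | none => simp
        | some p =>
          have hp : p ∈ zipL (l + 1) xs := List.mem_of_getElem? hi
          have hne : p.1 ≠ l := by simpa using this p hp
          simp [hne]
      rw [hstep]
      rw [foldl_dstep_cons l (x + y) (zipL (l + 1) ys) (zipL (l + 1) xs)
        (fun p hp => by have := zipL_keys_ge ys (l + 1) p hp; omega)]
      rw [ih (l + 1) xs]
      simp [addVec, zipL]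

-- the shifted form used at each node: seed dict at level l, child dicts from level l+1
theorem dmerge_shift (l x : Int) (xs ys : List Int) :
    dmerge (PySem.Dict.mk (zipL l (x :: xs))) (PySem.Dict.mk (zipL (l + 1) ys))
      = PySem.Dict.mk (zipL l (x :: addVec xs ys)) := by
  simp only [dmerge, zipL]
  rw [foldl_dstep_cons l x (zipL (l + 1) ys) (zipL (l + 1) xs)
    (fun p hp => by have := zipL_keys_ge ys (l + 1) p hp; omega)]
  have := foldl_dstep_zipL ys (l + 1) xs
  rw [this]

theorem addVec_assoc : ∀ (xs ys zs : List Int), addVec (addVec xs ys) zs = addVec xs (addVec ys zs) := by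
  intro xs
  induction xs with
  | nil => intro ys zs; rfl
  | cons x xs ih =>
    intro ys zs
    cases ys with
    | nil => rfl
    | cons y ys =>
      cases zs with
      | nil => rfl
      | cons z zs => simp [addVec, ih, add_assoc]

theorem countVec_append (T : PySem.Dict Int (List Int)) :
    ∀ (f : Nat) (as bs : List Int),
      countVec T f (as ++ bs) = addVec (countVec T f as) (countVec T f bs) := by
  intro f
  induction f with
  | zero => intro as bs; rfl
  | succ f ih =>
    intro as bs
    simp only [countVec, List.filter_append]
    rcases ha : as.filter (fun n => T.contains n) with _ | ⟨a, as'⟩ <;>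
      rcases hb : bs.filter (fun n => T.contains n) with _ | ⟨b, bs'⟩ <;>
        simp [addVec, ih, List.flatMap_append, List.length_append]
    exact ⟨by ring, (addVec_assoc _ _ _).symm⟩

-- A's recursion computes the per-level counts of the single-node frontier
theorem goA_eq (T : PySem.Dict Int (List Int)) :
    ∀ (f : Nat) (node l : Int),
      goA T f node l = PySem.Dict.mk (zipL l (countVec T f [node])) := by
  intro f
  induction f with
  | zero => intro node l; rfl
  | succ f ih =>
    intro node l
    by_cases h : T.contains node
    · have hfil : ([node].filter (fun n => T.contains n)) = [node] := by simp [h]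
      have hec : (PySem.Dict.empty : PySem.Dict Int Int).contains l = false := rfl
      have hseed : ((PySem.Dict.empty : PySem.Dict Int Int).insert l 1)
          = PySem.Dict.mk (zipL l ((1 : Int) :: [])) := rfl
      have hchild : [node].flatMap (childPair T)
          = [((PySem.List.pyGet? (T.getD node []) 2).getD 0)]
            ++ [((PySem.List.pyGet? (T.getD node []) 3).getD 0)] := by
        simp [childPair]
      simp only [goA, h, not_true_eq_false, if_false, countVec, hfil, hec,
        Bool.false_eq_true, not_false_eq_true, if_true]
      rw [hseed, ih, ih, dmerge_shift, dmerge_shift]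
      simp only [addVec]
      rw [hchild, countVec_append]
      simp [zipL]
    · have hfil : ([node].filter (fun n => T.contains n)) = [] := by simp [h]
      simp only [goA, h, if_true, countVec, hfil]
      rfl

-- B's loop appends the per-level counts of its frontier to the accumulated dict
theorem goB_eq (T : PySem.Dict Int (List Int)) :
    ∀ (f : Nat) (current : List Int) (l : Int) (pop : PySem.Dict Int Int),
      (∀ p ∈ pop.items, p.1 < l) →
      goB T f current l pop = PySem.Dict.mk (pop.items ++ zipL l (countVec T f current)) := by
  intro f
  induction f with
  | zero => intro current l pop _; simp [goB, countVec, zipL]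
  | succ f ih =>
    intro current l pop hkeys
    simp only [goB, countVec]
    rcases hc : current.filter (fun n => T.contains n) with _ | ⟨a, as⟩
    · simp [zipL]
    · rw [← hc]
      simp only [hc, reduceCtorEq, if_false]
      have hins : pop.insert l (((a :: as).length : Nat) : Int)
          = PySem.Dict.mk (pop.items ++ [(l, (((a :: as).length : Nat) : Int))]) := by
        have hnc : pop.contains l = false := by
          simp only [PySem.Dict.contains, List.any_eq_false]
          intro p hp
          have hpl := hkeys p hp
          simp only [beq_iff_eq]
          omega
        simp [PySem.Dict.insert, hnc]
      rw [hins]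
      rw [ih _ (l + 1) _ (by
        intro p hp
        simp only [List.mem_append, List.mem_singleton] at hp
        rcases hp with hp | hp
        · have := hkeys p hp; omega
        · simp [hp])]
      simp [zipL]

-- ===== VERDICT (by name: the statement is the Claim_ definition above) =====
theorem get_level_populations_spec : Claim_equal_get_level_populations := by
  intro tree node level _ _
  unfold Spec_get_level_populations get_level_populations get_level_populations_alt
  rw [goA_eq, goB_eq _ _ _ _ _ (by intro p hp; simp [PySem.Dict.empty] at hp)]
  simp [PySem.Dict.empty]
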